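-- pv_equiv track=rewrite | github.com/sproutsai-engg/coding_question_generator | json_files/python_codes/Q_1868.py | findRLEProduct
-- ===== SOURCE A (Python) =====
-- def findRLEProduct(encoded1, encoded2):
--     result = []
--     i, j, count1, count2 = 0, 0, 0, 0
--
--     while i < len(encoded1) and j < len(encoded2):
--         product = encoded1[i][0] * encoded2[j][0]
--         count = min(encoded1[i][1] - count1, encoded2[j][1] - count2)
--         count1 += count
--         count2 += count
--
--         if result and result[-1][0] == product:
--             result[-1][1] += count
--         else:
--             result.append([product, count])
--
--         if count1 == encoded1[i][1]:
--             i += 1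
--             count1 = 0
--
--         if count2 == encoded2[j][1]:
--             j += 1
--             count2 = 0
--
--     return result
-- ===== SOURCE B (Python) =====
-- def findRLEProduct(encoded1, encoded2):
--     # Treat both encodings as stacks of (value, remaining) runs, emit raw
--     # product runs, then compact adjacent equal products in a second pass.
--     stack1 = [(r[0], r[1]) for r in reversed(encoded1)]
--     stack2 = [(r[0], r[1]) for r in reversed(encoded2)]
--     raw = []
--     while stack1 and stack2:
--         v1, c1 = stack1.pop()
--         v2, c2 = stack2.pop()
--         c = min(c1, c2)
--         raw.append((v1 * v2, c))
--         if c1 - c != 0: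
--             stack1.append((v1, c1 - c))
--         if c2 - c != 0:
--             stack2.append((v2, c2 - c))
--     result = []
--     for p, c in raw:
--         if result and result[-1][0] == p:
--             result[-1][1] += c
--         else:
--             result.append([p, c])
--     return result
-- ===== Notes on version B (the rewrite author's own statement) =====
-- stated objective: alternative
-- what changed: Replaces A's single interleaved index/offset walk (i, j, count1, count2 with in-place last-run merging) by a two-phase pipeline: both encodings become stacks of (value, remaining) runs merged by pop/push-back into a raw product-run stream, which a separate second pass compacts by merging adjacent equal products.
-- outside the precondition, e.g. on findRLEProduct([[1, 5], [9]], [[2, 5]]): A returns [[2, 5]], B raises IndexError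
import Mathlib
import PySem

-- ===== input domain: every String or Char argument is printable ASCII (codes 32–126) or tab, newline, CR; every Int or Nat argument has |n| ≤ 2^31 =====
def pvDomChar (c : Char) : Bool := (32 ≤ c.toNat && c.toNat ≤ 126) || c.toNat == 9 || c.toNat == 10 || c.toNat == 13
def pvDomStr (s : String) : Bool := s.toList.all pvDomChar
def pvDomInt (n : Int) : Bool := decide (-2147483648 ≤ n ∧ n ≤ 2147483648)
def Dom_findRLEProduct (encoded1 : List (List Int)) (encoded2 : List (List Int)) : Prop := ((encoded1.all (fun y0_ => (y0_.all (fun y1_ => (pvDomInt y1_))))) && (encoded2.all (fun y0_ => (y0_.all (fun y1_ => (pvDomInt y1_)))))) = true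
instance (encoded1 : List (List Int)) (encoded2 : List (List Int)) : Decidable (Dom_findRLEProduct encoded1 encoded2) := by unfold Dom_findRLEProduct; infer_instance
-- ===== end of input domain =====

-- B replaces A's interleaved index/offset walk by a stack-merge producing raw product runs
-- plus a separate compaction pass (alternative decomposition, same cost); equal on Pre_.


-- shared by both ports: both Pythons contain literally this result-update code
-- ('if result and result[-1][0] == p: result[-1][1] += c else: result.append([p, c])')
def pvStep (res : List (List Int)) (product count : Int) : List (List Int) :=
  match res.getLast? with
  | some last =>
      if PySem.List.pyGet? last 0 = some product then
        res.dropLast ++ [[product, (PySem.List.pyGet? last 1).getD 0 + count]]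
      else res ++ [[product, count]]
  | none => res ++ [[product, count]]

-- ===== PORT A =====
def pvALoop (e1 e2 : List (List Int)) (i j : Nat) (c1 c2 : Int) (res : List (List Int)) :
    List (List Int) :=
  if h : i < e1.length ∧ j < e2.length then
    match PySem.List.pyGet? e1[i] 0, PySem.List.pyGet? e1[i] 1,
          PySem.List.pyGet? e2[j] 0, PySem.List.pyGet? e2[j] 1 with
    | some v1, some n1, some v2, some n2 =>
        let product := v1 * v2
        let count := min (n1 - c1) (n2 - c2)
        let c1' := c1 + count
        let c2' := c2 + count
        let res' := pvStep res product count
        pvALoop e1 e2 (if c1' = n1 then i + 1 else i) (if c2' = n2 then j + 1 else j)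
          (if c1' = n1 then 0 else c1') (if c2' = n2 then 0 else c2') res'
    | _, _, _, _ => res  -- Python raises IndexError here (run shorter than 2); excluded by Pre_
  else res
termination_by (e1.length - i) + (e2.length - j)
decreasing_by
  rcases min_choice (n1 - c1) (n2 - c2) with hm | hm <;> split_ifs <;> omega

def findRLEProduct (encoded1 : List (List Int)) (encoded2 : List (List Int)) : List (List Int) :=
  pvALoop encoded1 encoded2 0 0 0 0 []

-- ===== PORT B =====
-- Python B builds the reversed list of (r[0], r[1]) pairs and pops from the END; here the
-- same stack is kept in forward order and popped from the head (same traversal order).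
-- On a run shorter than 2 entries Python B raises IndexError (excluded by Pre_); getD 0 is junk there.
def pvRuns (enc : List (List Int)) : List (Int × Int) :=
  enc.map (fun r => ((PySem.List.pyGet? r 0).getD 0, (PySem.List.pyGet? r 1).getD 0))

def pvMergeRaw : List (Int × Int) → List (Int × Int) → List (Int × Int)
  | [], _ => []
  | _ :: _, [] => []
  | (v1, c1) :: t1, (v2, c2) :: t2 =>
      let c := min c1 c2
      (v1 * v2, c) ::
        pvMergeRaw (if c1 - c ≠ 0 then (v1, c1 - c) :: t1 else t1)
                   (if c2 - c ≠ 0 then (v2, c2 - c) :: t2 else t2)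
termination_by a b => a.length + b.length
decreasing_by
  rcases min_choice c1 c2 with hm | hm <;> split_ifs <;> simp only [List.length_cons] <;> omega

def findRLEProduct_alt (encoded1 : List (List Int)) (encoded2 : List (List Int)) :
    List (List Int) :=
  (pvMergeRaw (pvRuns encoded1) (pvRuns encoded2)).foldl
    (fun res pc => pvStep res pc.1 pc.2) []

-- ===== PRECONDITION & SPEC =====
-- Pre_ excludes inputs containing a run with fewer than two entries: A raises IndexError when
-- it reaches such a run, and whether an unreached malformed run is tolerated (A's lazy
-- indexing tolerates it, B's eager conversion raises) is an accident no caller would rely on.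
def Pre_findRLEProduct (encoded1 : List (List Int)) (encoded2 : List (List Int)) : Prop :=
  (∀ r ∈ encoded1, 2 ≤ r.length) ∧ (∀ r ∈ encoded2, 2 ≤ r.length)
instance (encoded1 : List (List Int)) (encoded2 : List (List Int)) : Decidable (Pre_findRLEProduct encoded1 encoded2) := by unfold Pre_findRLEProduct; infer_instance

def pvWitness_findRLEProduct : List (List Int) × List (List Int) :=
  ([[2, 3], [5, 1]], [[3, 2], [4, 2]])

def Spec_findRLEProduct (encoded1 : List (List Int)) (encoded2 : List (List Int)) (out : List (List Int)) : Prop := out = findRLEProduct_alt encoded1 encoded2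
instance (encoded1 : List (List Int)) (encoded2 : List (List Int)) (out : List (List Int)) : Decidable (Spec_findRLEProduct encoded1 encoded2 out) := by unfold Spec_findRLEProduct; infer_instance

-- ===== CLAIM (what is proved, stated in full; the proofs are below) =====
def Claim_equal_findRLEProduct : Prop := ∀ (encoded1 : List (List Int)) (encoded2 : List (List Int)), Dom_findRLEProduct encoded1 encoded2 → Pre_findRLEProduct encoded1 encoded2 → Spec_findRLEProduct encoded1 encoded2 (findRLEProduct encoded1 encoded2)

-- ===== LEMMAS AND PROOFS =====

-- A's (i, c1) view of encoding e as a stack of (value, remaining) runs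
def pvRem (e : List (List Int)) (i : Nat) (c : Int) : List (Int × Int) :=
  match e.drop i with
  | [] => []
  | r :: t =>
      ((PySem.List.pyGet? r 0).getD 0, (PySem.List.pyGet? r 1).getD 0 - c) :: pvRuns t

lemma pvRem_zero (e : List (List Int)) (i : Nat) : pvRem e i 0 = pvRuns (e.drop i) := by
  unfold pvRem
  cases e.drop i with
  | nil => simp [pvRuns]
  | cons r t => simp [pvRuns]

lemma pvRem_cons {e : List (List Int)} {i : Nat} (hi : i < e.length) (c : Int) :
    pvRem e i c =
      ((PySem.List.pyGet? e[i] 0).getD 0, (PySem.List.pyGet? e[i] 1).getD 0 - c) ::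
        pvRuns (e.drop (i+1)) := by
  unfold pvRem
  rw [List.drop_eq_getElem_cons hi]

lemma pvRem_nil {e : List (List Int)} {i : Nat} (hi : e.length ≤ i) (c : Int) :
    pvRem e i c = [] := by
  unfold pvRem
  rw [List.drop_eq_nil_iff.mpr hi]

lemma pvMergeRaw_nil_right (x : List (Int × Int)) : pvMergeRaw x [] = [] := by
  cases x <;> rw [pvMergeRaw]

lemma pvALoop_eq (e1 e2 : List (List Int)) (h1 : ∀ r ∈ e1, 2 ≤ r.length)
    (h2 : ∀ r ∈ e2, 2 ≤ r.length) (i j : Nat) (c1 c2 : Int) (res : List (List Int)) :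
    pvALoop e1 e2 i j c1 c2 res =
      (pvMergeRaw (pvRem e1 i c1) (pvRem e2 j c2)).foldl
        (fun res pc => pvStep res pc.1 pc.2) res := by
  fun_induction pvALoop e1 e2 i j c1 c2 res
  case case1 =>
    rename_i i j c1 c2 res h v1 n1 v2 n2 hb2 hb1 ha2 ha1 prod cnt c1x c2x resx ih
    obtain ⟨hi, hj⟩ := h
    simp only [prod, cnt, c1x, c2x, resx, dite_eq_ite] at ih ⊢
    rw [pvRem_cons hi c1, pvRem_cons hj c2, ha1, ha2, hb1, hb2]
    simp only [Option.getD_some]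
    rw [pvMergeRaw]
    have hS1 : (if (n1 - c1) - min (n1 - c1) (n2 - c2) ≠ 0 then
          (v1, (n1 - c1) - min (n1 - c1) (n2 - c2)) :: pvRuns (e1.drop (i+1))
        else pvRuns (e1.drop (i+1)))
        = pvRem e1 (if c1 + min (n1 - c1) (n2 - c2) = n1 then i + 1 else i)
            (if c1 + min (n1 - c1) (n2 - c2) = n1 then 0 else c1 + min (n1 - c1) (n2 - c2)) := by
      by_cases hA : c1 + min (n1 - c1) (n2 - c2) = n1
      · simp [show ¬((n1 - c1) - min (n1 - c1) (n2 - c2) ≠ 0) by omega, pvRem_zero, hA]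
      · rw [if_neg hA, if_neg hA, pvRem_cons hi, ha1, ha2]
        simp only [Option.getD_some]
        rw [if_pos (by omega)]
        congr 2
        omega
    have hS2 : (if (n2 - c2) - min (n1 - c1) (n2 - c2) ≠ 0 then
          (v2, (n2 - c2) - min (n1 - c1) (n2 - c2)) :: pvRuns (e2.drop (j+1))
        else pvRuns (e2.drop (j+1)))
        = pvRem e2 (if c2 + min (n1 - c1) (n2 - c2) = n2 then j + 1 else j)
            (if c2 + min (n1 - c1) (n2 - c2) = n2 then 0 else c2 + min (n1 - c1) (n2 - c2)) := by
      by_cases hA : c2 + min (n1 - c1) (n2 - c2) = n2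
      · simp [show ¬((n2 - c2) - min (n1 - c1) (n2 - c2) ≠ 0) by omega, pvRem_zero, hA]
      · rw [if_neg hA, if_neg hA, pvRem_cons hj, hb1, hb2]
        simp only [Option.getD_some]
        rw [if_pos (by omega)]
        congr 2
        omega
    rw [List.foldl_cons, hS1, hS2]
    exact ih
  case case2 i j c1 c2 res h hnone =>
    have m1 := h1 _ (e1.getElem_mem h.1)
    have m2 := h2 _ (e2.getElem_mem h.2)
    exact (hnone e1[i][0] e1[i][1] e2[j][0] e2[j][1]
      (PySem.List.pyGet?_ofNat _ 0 (by omega)) (PySem.List.pyGet?_ofNat _ 1 (by omega))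
      (PySem.List.pyGet?_ofNat _ 0 (by omega)) (PySem.List.pyGet?_ofNat _ 1 (by omega))).elim
  case case3 i j c1 c2 res h =>
    rcases Nat.lt_or_ge i e1.length with hi | hi
    · have hj : e2.length ≤ j := by omega
      rw [pvRem_nil hj c2, pvMergeRaw_nil_right]
      rfl
    · rw [pvRem_nil hi c1]
      rw [show pvMergeRaw [] (pvRem e2 j c2) = [] from by rw [pvMergeRaw]]
      rfl

theorem findRLEProduct_spec : Claim_equal_findRLEProduct := by
  intro e1 e2 _ hpre
  unfold Spec_findRLEProduct findRLEProduct findRLEProduct_alt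
  rw [pvALoop_eq e1 e2 hpre.1 hpre.2, pvRem_zero, pvRem_zero]
  simp
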